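-- pv_equiv track=rewrite | github.com/AdrianDeAnda/Advent2018 | Day08/main.py | parse
-- ===== SOURCE A (Python) =====
-- def parse(data, totals: int = 0):
--     children, metas = data[:2]
--     data = data[2:]
--     scores = []
--
--     for i in range(children):
--         total, score, data = parse(data)
--         totals += total
--         scores.append(score)
--
--     totals += sum(data[:metas])
--
--     if children == 0:
--         return (totals, sum(data[:metas]), data[metas:])
--     else:
--         return (
--             totals,
--             sum(
--                 scores[k - 1]
--                 for k in data[:metas]
--                 if k > 0 and k <= len(scores)
--             ),
--             data[metas:],
--         )
-- ===== SOURCE B (Python) =====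
-- def parse(data, totals: int = 0):
--     # Iterative post-order parse with an explicit stack over a shrinking suffix
--     # of data, instead of A's recursion. Frames: [children_left, metas, scores].
--     rest = data
--     stack = [[1, 0, []]]  # sentinel frame waiting for the root as its only child
--     while True:
--         top = stack[-1]
--         if top[0] > 0:
--             children, metas = rest[0], rest[1]
--             rest = rest[2:]
--             top[0] -= 1
--             stack.append([children, metas, []])
--         else:
--             stack.pop()
--             meta = rest[:top[1]]
--             rest = rest[top[1]:]
--             totals += sum(meta)
--             if top[0] == 0 and not top[2]:
--                 value = sum(meta)
--             else:
--                 value = sum(top[2][k - 1] for k in meta if 0 < k <= len(top[2]))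
--             if len(stack) == 1:
--                 return (totals, value, rest)
--             stack[-1][2].append(value)
-- ===== Notes on version B (the rewrite author's own statement) =====
-- stated objective: alternative
-- what changed: A's recursive descent (recursion per node, looping over range(children) with recursive calls) is replaced by an iterative post-order parse with an explicit stack of frames [children_left, metas, scores] over a shrinking suffix of data; node values and metadata totals are combined when a frame is popped.
import Mathlib
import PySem

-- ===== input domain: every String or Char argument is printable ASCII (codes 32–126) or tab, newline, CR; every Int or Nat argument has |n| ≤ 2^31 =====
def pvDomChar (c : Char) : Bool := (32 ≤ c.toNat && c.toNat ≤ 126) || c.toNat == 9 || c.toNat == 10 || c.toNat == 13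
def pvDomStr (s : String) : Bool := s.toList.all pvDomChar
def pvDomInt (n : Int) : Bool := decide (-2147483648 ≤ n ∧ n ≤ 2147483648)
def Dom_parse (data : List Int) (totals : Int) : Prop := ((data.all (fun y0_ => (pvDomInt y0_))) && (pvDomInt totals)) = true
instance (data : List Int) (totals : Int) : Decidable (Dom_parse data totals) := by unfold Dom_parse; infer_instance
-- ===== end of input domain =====

-- B replaces A's recursion by an iterative post-order parse with an explicit stack of frames; same values.

-- ===== PORT A =====
-- shared subexpression of both Pythons: sum(scores[k-1] for k in meta if k > 0 and k <= len(scores))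
def scoreVal (scores : List Int) (meta_ : List Int) : Int :=
  (meta_.filter (fun k => decide (0 < k) && decide (k ≤ (scores.length : Int)))).foldl
    (fun a k => a + ((PySem.List.pyGet? scores (k - 1)).getD 0)) 0

mutual
-- literal port of A's recursive parse; fuel only makes the recursion structural, none = Python raises
def parseAux : Nat → List Int → Int → Option (Int × Int × List Int)
  | 0, _, _ => none
  | f+1, data, totals =>
    match data with
    | c :: m :: rest =>
      match childLoop f c.toNat rest 0 [] with
      | none => none
      | some (tc, scores, d') =>
        let md := PySem.List.slice d' none (some m)
        let totals' := totals + tc + md.sum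
        if c = 0 then some (totals', md.sum, PySem.List.slice d' (some m) none)
        else some (totals', scoreVal scores md, PySem.List.slice d' (some m) none)
    | _ => none

-- A's `for i in range(children)` loop (children.toNat iterations), accumulating totals and scores
def childLoop : Nat → Nat → List Int → Int → List Int → Option (Int × List Int × List Int)
  | _, 0, data, totals, scores => some (totals, scores, data)
  | 0, _+1, _, _, _ => none
  | f+1, n+1, data, totals, scores =>
    match parseAux f data 0 with
    | none => none
    | some (t, v, d') => childLoop f n d' (totals + t) (scores ++ [v])
end

def parse (data : List Int) (totals : Int) : Int × Int × List Int :=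
  (parseAux (2 * data.length + 2) data totals).getD (0, 0, [])

-- ===== PORT B =====
-- used by machineRun's termination proof
theorem slice_from_length_le (xs : List Int) (a : Int) :
    (PySem.List.slice xs (some a) none).length ≤ xs.length := by
  rw [PySem.List.slice_some_none]; simp

-- literal port of B's while-loop: stack of frames (children_left, metas, scores), head = top of stack
def machineRun (rest : List Int) (stack : List (Int × Int × List Int)) (totals : Int) : Int × Int × List Int :=
  match stack with
  | [] => (0, 0, [])                      -- unreachable: the sentinel is never popped
  | top :: below =>
    if 0 < top.1 then
      match rest with
      | c :: m :: rest' =>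
        machineRun rest' ((c, m, ([] : List Int)) :: (top.1 - 1, top.2.1, top.2.2) :: below) totals
      | _ => (0, 0, [])                   -- Python raises IndexError here
    else
      let md := PySem.List.slice rest none (some top.2.1)
      let rest' := PySem.List.slice rest (some top.2.1) none
      let totals' := totals + md.sum
      let value := if top.1 = 0 ∧ top.2.2 = [] then md.sum else scoreVal top.2.2 md
      match below with
      | [] => (0, 0, [])                  -- unreachable
      | [_] => (totals', value, rest')    -- only the sentinel left: return
      | p :: pb => machineRun rest' ((p.1, p.2.1, p.2.2 ++ [value]) :: pb) totals'
termination_by 2 * rest.length + stack.length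
decreasing_by
  · simp; omega
  · have h := slice_from_length_le rest top.2.1
    simp only [List.length_cons]
    omega

def parse_alt (data : List Int) (totals : Int) : Int × Int × List Int :=
  machineRun data [(1, 0, [])] totals

-- ===== PRECONDITION & SPEC =====
mutual
-- shape checker: data starts with a well-formed tree encoding (A's unpack `data[:2]` never fails)
def okAux : Nat → List Int → Option (List Int)
  | 0, _ => none
  | f+1, data =>
    match data with
    | c :: m :: rest =>
      match okLoop f c.toNat rest with
      | none => none
      | some d' => some (PySem.List.slice d' (some m) none)
    | _ => none
def okLoop : Nat → Nat → List Int → Option (List Int)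
  | _, 0, data => some data
  | 0, _+1, _ => none
  | f+1, n+1, data =>
    match okAux f data with
    | none => none
    | some d' => okLoop f n d'
end

-- Pre_ excludes exactly the inputs on which A raises (ValueError: fewer than 2 ints left at some node header)
def Pre_parse (data : List Int) (totals : Int) : Prop :=
  (okAux (2 * data.length + 2) data).isSome = true
instance (data : List Int) (totals : Int) : Decidable (Pre_parse data totals) := by
  unfold Pre_parse; infer_instance

def pvWitness_parse : List Int × Int := ([2, 3, 0, 3, 10, 11, 12, 1, 1, 0, 1, 99, 2, 1, 1, 2], 4)

def Spec_parse (data : List Int) (totals : Int) (out : Int × Int × List Int) : Prop := out = parse_alt data totals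
instance (data : List Int) (totals : Int) (out : Int × Int × List Int) : Decidable (Spec_parse data totals out) := by unfold Spec_parse; infer_instance

-- ===== CLAIM (what is proved, stated in full; the proofs are below) =====
def Claim_equal_parse : Prop := ∀ (data : List Int) (totals : Int), Dom_parse data totals → Pre_parse data totals → Spec_parse data totals (parse data totals)

-- ===== LEMMAS AND PROOFS =====

-- the shape checker is the projection of A's parser onto its remainder
theorem okCorr : ∀ f : Nat,
    (∀ data : List Int, okAux f data = (parseAux f data 0).map (fun o => o.2.2)) ∧
    (∀ (n : Nat) (data : List Int) (t : Int) (sc : List Int),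
      okLoop f n data = (childLoop f n data t sc).map (fun o => o.2.2)) := by
  intro f
  induction f with
  | zero =>
    constructor
    · intro data; simp [okAux, parseAux]
    · intro n data t sc
      cases n with
      | zero => simp [okLoop, childLoop]
      | succ k => simp [okLoop, childLoop]
  | succ f ih =>
    obtain ⟨ihA, ihL⟩ := ih
    constructor
    · intro data
      match data with
      | [] => simp [okAux, parseAux]
      | [c] => simp [okAux, parseAux]
      | c :: m :: rest =>
        simp only [okAux, parseAux]
        rw [ihL c.toNat rest 0 []]
        cases h : childLoop f c.toNat rest 0 [] with
        | none => simp
        | some o =>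
          obtain ⟨tc, scores, d'⟩ := o
          simp only [Option.map_some]
          split <;> simp
    · intro n data t sc
      cases n with
      | zero => simp [okLoop, childLoop]
      | succ k =>
        simp only [okLoop, childLoop]
        rw [ihA data]
        cases h : parseAux f data 0 with
        | none => simp
        | some o =>
          obtain ⟨tt, v, d'⟩ := o
          simpa using ihL k d' (t + tt) (sc ++ [v])

-- A's totals parameter is only added at the end
theorem parseAux_shift (f : Nat) (data : List Int) (totals : Int) :
    parseAux f data totals = (parseAux f data 0).map (fun o => (totals + o.1, o.2)) := by
  cases f with
  | zero => simp [parseAux]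
  | succ f =>
    match data with
    | [] => simp [parseAux]
    | [c] => simp [parseAux]
    | c :: m :: rest =>
      simp only [parseAux]
      cases h : childLoop f c.toNat rest 0 [] with
      | none => simp
      | some o =>
        obtain ⟨tc, scores, d'⟩ := o
        simp only [Option.map_some]
        split <;> simp <;> ring

-- the children loop appends exactly n scores
theorem childLoop_len : ∀ (f n : Nat) (data : List Int) (t : Int) (sc : List Int)
    (tt : Int) (scf : List Int) (d' : List Int),
    childLoop f n data t sc = some (tt, scf, d') → scf.length = sc.length + n := by
  intro f
  induction f with
  | zero =>
    intro n data t sc tt scf d' h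
    cases n with
    | zero => simp [childLoop] at h; simp [← h.2.1]
    | succ k => simp [childLoop] at h
  | succ f ih =>
    intro n data t sc tt scf d' h
    cases n with
    | zero =>
      simp [childLoop] at h
      simp [← h.2.1]
    | succ k =>
      simp only [childLoop] at h
      cases hp : parseAux f data 0 with
      | none => rw [hp] at h; simp at h
      | some o =>
        obtain ⟨t1, v, d1⟩ := o
        rw [hp] at h
        simp only at h
        have := ih k d1 (t + t1) (sc ++ [v]) tt scf d' h
        simp at this
        omega

-- one machine step: open a child node
theorem mstep_open (c m : Int) (rest' : List Int) (top : Int × Int × List Int)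
    (below : List (Int × Int × List Int)) (totals : Int) (h : 0 < top.1) :
    machineRun (c :: m :: rest') (top :: below) totals =
      machineRun rest' ((c, m, ([] : List Int)) :: (top.1 - 1, top.2.1, top.2.2) :: below) totals := by
  rw [machineRun]; simp [h]

-- one machine step: pop the last real frame and return
theorem mstep_ret (rest : List Int) (top s : Int × Int × List Int) (totals : Int)
    (h : ¬ 0 < top.1) :
    machineRun rest (top :: [s]) totals =
      (totals + (PySem.List.slice rest none (some top.2.1)).sum,
       (if top.1 = 0 ∧ top.2.2 = [] then (PySem.List.slice rest none (some top.2.1)).sum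
        else scoreVal top.2.2 (PySem.List.slice rest none (some top.2.1))),
       PySem.List.slice rest (some top.2.1) none) := by
  rw [machineRun.eq_def]; simp [h]

-- one machine step: pop a frame, handing its value to its parent
theorem mstep_pop (rest : List Int) (top p q : Int × Int × List Int)
    (qs : List (Int × Int × List Int)) (totals : Int) (h : ¬ 0 < top.1) :
    machineRun rest (top :: p :: q :: qs) totals =
      machineRun (PySem.List.slice rest (some top.2.1) none)
        ((p.1, p.2.1, p.2.2 ++
          [if top.1 = 0 ∧ top.2.2 = [] then (PySem.List.slice rest none (some top.2.1)).sum
           else scoreVal top.2.2 (PySem.List.slice rest none (some top.2.1))]) :: q :: qs)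
        (totals + (PySem.List.slice rest none (some top.2.1)).sum) := by
  rw [machineRun.eq_def]; simp [h]

-- simulation: the stack machine tracks A's recursion
theorem sim : ∀ f : Nat,
    (∀ (data : List Int) (t v : Int) (r : List Int), parseAux f data 0 = some (t, v, r) →
      ∀ (fr : Int × Int × List Int) (below : List (Int × Int × List Int)) (totals : Int), 0 < fr.1 →
        machineRun data (fr :: below) totals =
          (if below = [] then (totals + t, v, r)
           else machineRun r ((fr.1 - 1, fr.2.1, fr.2.2 ++ [v]) :: below) (totals + t)))
    ∧
    (∀ (n : Nat) (data : List Int) (t0 : Int) (sc0 : List Int) (tt : Int) (scf : List Int) (d' : List Int),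
      childLoop f n data t0 sc0 = some (tt, scf, d') →
      ∀ (r : Int) (ms : Int) (below : List (Int × Int × List Int)) (totals : Int),
        r.toNat = n → below ≠ [] →
        machineRun data ((r, ms, sc0) :: below) totals =
          machineRun d' ((r - (n : Int), ms, scf) :: below) (totals + (tt - t0))) := by
  intro f
  induction f with
  | zero =>
    constructor
    · intro data t v r h; simp [parseAux] at h
    · intro n data t0 sc0 tt scf d' h r ms below totals hr hb
      cases n with
      | zero =>
        simp [childLoop] at h
        obtain ⟨h1, h2, h3⟩ := h
        subst h1; subst h2; subst h3
        simp
      | succ k => simp [childLoop] at h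
  | succ f ih =>
    constructor
    · intro data t v r h fr below totals hfr
      match data with
      | [] => simp [parseAux] at h
      | [c] => simp [parseAux] at h
      | c :: m :: rest =>
        simp only [parseAux] at h
        cases hc : childLoop f c.toNat rest 0 [] with
        | none => rw [hc] at h; simp at h
        | some o =>
          obtain ⟨tc, scores, d'⟩ := o
          rw [hc] at h
          simp only at h
          have hlen := childLoop_len f c.toNat rest 0 [] tc scores d' hc
          simp only [List.length_nil, Nat.zero_add] at hlen
          rw [mstep_open c m rest fr below totals hfr]
          rw [ih.2 c.toNat rest 0 [] tc scores d' hc c m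
              ((fr.1 - 1, fr.2.1, fr.2.2) :: below) totals rfl (by simp)]
          have hnpos : ¬ 0 < c - (c.toNat : Int) := by omega
          -- the machine's leaf test (counter 0 and no scores) is A's `children == 0`
          have hcond : ((c - (c.toNat : Int) = 0 ∧ scores = []) ↔ c = 0) := by
            constructor
            · rintro ⟨h1, h2⟩
              subst h2
              simp at hlen
              omega
            · intro h0
              subst h0
              simp at hlen ⊢
              exact hlen
          by_cases hc0 : c = 0
          · simp only [if_pos hc0, Option.some.injEq, Prod.mk.injEq] at h
            obtain ⟨ht, hv, hr⟩ := h
            cases below with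
            | nil =>
              rw [if_pos rfl, mstep_ret _ _ _ _ hnpos]
              simp only [hcond, if_pos hc0]
              rw [← ht, ← hv, ← hr]
              simp only [Prod.mk.injEq]
              refine ⟨by ring, trivial⟩
            | cons b bs =>
              rw [if_neg (by simp), mstep_pop _ _ _ _ _ _ hnpos]
              simp only [hcond, if_pos hc0]
              rw [← ht, ← hv, ← hr]
              congr 1; (first | rfl | ring)
          · simp only [if_neg hc0, Option.some.injEq, Prod.mk.injEq] at h
            obtain ⟨ht, hv, hr⟩ := h
            cases below with
            | nil =>
              rw [if_pos rfl, mstep_ret _ _ _ _ hnpos]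
              simp only [hcond, if_neg hc0]
              rw [← ht, ← hv, ← hr]
              simp only [Prod.mk.injEq]
              refine ⟨by ring, trivial⟩
            | cons b bs =>
              rw [if_neg (by simp), mstep_pop _ _ _ _ _ _ hnpos]
              simp only [hcond, if_neg hc0]
              rw [← ht, ← hv, ← hr]
              congr 1; (first | rfl | ring)
    · intro n data t0 sc0 tt scf d' h r ms below totals hr hb
      cases n with
      | zero =>
        simp [childLoop] at h
        obtain ⟨h1, h2, h3⟩ := h
        subst h1; subst h2; subst h3
        simp
      | succ k =>
        simp only [childLoop] at h
        cases hp : parseAux f data 0 with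
        | none => rw [hp] at h; simp at h
        | some o =>
          obtain ⟨t1, v1, d1⟩ := o
          rw [hp] at h
          simp only at h
          have hrpos : 0 < r := by omega
          have h1 := ih.1 data t1 v1 d1 hp (r, ms, sc0) below totals hrpos
          simp only [if_neg hb] at h1
          rw [h1]
          have h2 := ih.2 k d1 (t0 + t1) (sc0 ++ [v1]) tt scf d' h (r - 1) ms below
              (totals + t1) (by omega) hb
          rw [h2]
          have e1 : r - 1 - (k : Int) = r - ((k + 1 : Nat) : Int) := by push_cast; ring
          have e2 : totals + t1 + (tt - (t0 + t1)) = totals + (tt - t0) := by ring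
          rw [e1, e2]

-- ===== VERDICT (by name: the statement is the Claim_ definition above) =====
theorem parse_spec : Claim_equal_parse := by
  intro data totals _dom hpre
  unfold Pre_parse at hpre
  rw [(okCorr (2 * data.length + 2)).1 data] at hpre
  cases hp : parseAux (2 * data.length + 2) data 0 with
  | none => rw [hp] at hpre; simp at hpre
  | some o =>
    obtain ⟨t, v, r⟩ := o
    unfold Spec_parse parse parse_alt
    rw [parseAux_shift, hp]
    simp only [Option.map_some, Option.getD_some]
    have hm := (sim (2 * data.length + 2)).1 data t v r hp (1, 0, []) [] totals (by norm_num)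
    simpa using hm.symm
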